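-- pv_equiv track=rewrite | github.com/kpo31/nqueens | nqueens.py | f
-- ===== SOURCE A (Python) =====
-- def f(state):
--     count = 0
--     if state is None:
--         return 0
--     for i in range(len(state)):
--         for j in range(len(state)):
--             num_x = state[j]
--             num_y = state[i]
--             row_diff = abs(num_y - num_x)
--             col_diff = abs(j - i)
--             if i == j:  # skip the same element
--                 continue
--             if state[i] == state[j]:  # same row
--                 count += 1
--                 break
--             if row_diff == col_diff:  # check for the diagonals
--                 count += 1
--                 break
--
--     return count
-- ===== SOURCE B (Python) =====
-- def f(state):
--     if state is None:
--         return 0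
--     rows = {}
--     d1 = {}
--     d2 = {}
--     for i, v in enumerate(state):
--         rows[v] = rows.get(v, 0) + 1
--         d1[v - i] = d1.get(v - i, 0) + 1
--         d2[v + i] = d2.get(v + i, 0) + 1
--     total = 0
--     for i, v in enumerate(state):
--         if rows[v] > 1 or d1[v - i] > 1 or d2[v + i] > 1:
--             total += 1
--     return total
-- ===== Notes on version B (the rewrite author's own statement) =====
-- stated objective: faster
-- what changed: Replaces the quadratic all-pairs scan with hash buckets keyed by row, row-index and row+index, flagging each queen whose row/diagonal bucket holds more than one queen.
import Mathlib
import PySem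

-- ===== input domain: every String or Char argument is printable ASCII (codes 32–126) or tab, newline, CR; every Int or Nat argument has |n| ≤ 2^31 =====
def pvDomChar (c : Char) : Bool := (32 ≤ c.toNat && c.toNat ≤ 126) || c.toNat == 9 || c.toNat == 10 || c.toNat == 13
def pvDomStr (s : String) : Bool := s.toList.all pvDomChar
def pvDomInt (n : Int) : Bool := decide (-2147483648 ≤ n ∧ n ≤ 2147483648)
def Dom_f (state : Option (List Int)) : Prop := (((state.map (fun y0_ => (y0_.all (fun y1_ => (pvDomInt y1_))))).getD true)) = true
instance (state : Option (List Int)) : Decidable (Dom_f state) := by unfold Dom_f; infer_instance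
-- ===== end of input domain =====

-- B replaces A's quadratic all-pairs scan by O(n) hash buckets on row, row-index and row+index (timed asymptotically faster).

-- ===== PORT A =====
-- inner 'for j in range(len(state))' with continue/break; indices produced by range are
-- always in range, so pyGetD is exact here
def fInner (s : List Int) (i : Int) (count : Int) : List Int → Int
  | [] => count
  | j :: js =>
    let num_x := PySem.List.pyGetD s j 0
    let num_y := PySem.List.pyGetD s i 0
    let row_diff := |num_y - num_x|
    let col_diff := |j - i|
    if i = j then fInner s i count js
    else if PySem.List.pyGetD s i 0 = PySem.List.pyGetD s j 0 then count + 1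
    else if row_diff = col_diff then count + 1
    else fInner s i count js

def f (state : Option (List Int)) : Int :=
  match state with
  | none => 0
  | some s =>
    (PySem.List.pyRange 0 (PySem.List.len s) 1).foldl
      (fun count i => fInner s i count (PySem.List.pyRange 0 (PySem.List.len s) 1)) 0

-- ===== PORT B =====
-- one pass builds the three counting dicts (rows, v-i, v+i); a second pass counts the
-- queens whose bucket holds more than one queen
def f_alt (state : Option (List Int)) : Int :=
  match state with
  | none => 0
  | some s =>
    let ds := (PySem.List.enumerate s).foldl
      (fun (d : PySem.Dict Int Int × PySem.Dict Int Int × PySem.Dict Int Int) p =>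
        (d.1.insert p.2 (d.1.getD p.2 0 + 1),
         d.2.1.insert (p.2 - p.1) (d.2.1.getD (p.2 - p.1) 0 + 1),
         d.2.2.insert (p.2 + p.1) (d.2.2.getD (p.2 + p.1) 0 + 1)))
      (PySem.Dict.empty, PySem.Dict.empty, PySem.Dict.empty)
    (PySem.List.enumerate s).foldl
      (fun total p =>
        if ds.1.getD p.2 0 > 1 ∨ ds.2.1.getD (p.2 - p.1) 0 > 1 ∨ ds.2.2.getD (p.2 + p.1) 0 > 1
        then total + 1 else total) 0

-- ===== PRECONDITION & SPEC =====
def Spec_f (state : Option (List Int)) (out : Int) : Prop := out = f_alt state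
instance (state : Option (List Int)) (out : Int) : Decidable (Spec_f state out) := by unfold Spec_f; infer_instance

-- ===== CLAIM (what is proved, stated in full; the proofs are below) =====
def Claim_equal_f : Prop := ∀ (state : Option (List Int)), Dom_f state → Spec_f state (f state)

-- ===== LEMMAS AND PROOFS =====

-- the Boolean test A's inner loop applies to the pair (i, j)
def condA (s : List Int) (i j : Int) : Bool :=
  !(i == j) && (PySem.List.pyGetD s i 0 == PySem.List.pyGetD s j 0
    || |PySem.List.pyGetD s i 0 - PySem.List.pyGetD s j 0| == |j - i|)

theorem fInner_eq (s : List Int) (i count : Int) (js : List Int) :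
    fInner s i count js = count + (if js.any (condA s i) then 1 else 0) := by
  induction js with
  | nil => simp [fInner]
  | cons j js ih =>
    simp only [fInner]
    by_cases hij : i = j
    · subst hij
      rw [if_pos rfl, List.any_cons, ih]
      have hp : condA s i i = false := by simp [condA]
      rw [hp, Bool.false_or]
    · rw [if_neg hij, List.any_cons]
      by_cases hrow : PySem.List.pyGetD s i 0 = PySem.List.pyGetD s j 0
      · rw [if_pos hrow]
        have hp : condA s i j = true := by simp [condA, hij, hrow]
        rw [hp, Bool.true_or, if_pos rfl]
      · rw [if_neg hrow]
        by_cases hd : |PySem.List.pyGetD s i 0 - PySem.List.pyGetD s j 0| = |j - i|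
        · rw [if_pos hd]
          have hp : condA s i j = true := by simp [condA, hij, hd]
          rw [hp, Bool.true_or, if_pos rfl]
        · rw [if_neg hd, ih]
          have hp : condA s i j = false := by simp [condA, hij, hrow, hd]
          rw [hp, Bool.false_or]

-- split the triple-dict fold into three independent folds
theorem tripleFold (l : List (Int × Int)) (a b c : PySem.Dict Int Int) :
    l.foldl (fun (d : PySem.Dict Int Int × PySem.Dict Int Int × PySem.Dict Int Int) p =>
        (d.1.insert p.2 (d.1.getD p.2 0 + 1),
         d.2.1.insert (p.2 - p.1) (d.2.1.getD (p.2 - p.1) 0 + 1),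
         d.2.2.insert (p.2 + p.1) (d.2.2.getD (p.2 + p.1) 0 + 1))) (a, b, c)
    = (l.foldl (fun d p => d.insert p.2 (d.getD p.2 0 + 1)) a,
       l.foldl (fun d p => d.insert (p.2 - p.1) (d.getD (p.2 - p.1) 0 + 1)) b,
       l.foldl (fun d p => d.insert (p.2 + p.1) (d.getD (p.2 + p.1) 0 + 1)) c) := by
  induction l generalizing a b c with
  | nil => rfl
  | cons p l ih => simp only [List.foldl_cons]; exact ih _ _ _

-- a value occurring at index i occurs more than once iff it also occurs at another index
theorem count_one_lt {l : List Int} {i : Nat} (hi : i < l.length) {v : Int} (hv : l[i] = v) :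
    1 < l.count v ↔ ∃ j, ∃ _ : j < l.length, j ≠ i ∧ l[j] = v := by
  have hsplit : l = l.take i ++ l[i] :: l.drop (i + 1) := by
    conv_lhs => rw [← List.take_append_drop i l]
    rw [List.getElem_cons_drop]
  have hcount : l.count v = (l.take i).count v + ((l.drop (i + 1)).count v + 1) := by
    conv_lhs => rw [hsplit]
    simp [List.count_append, hv]
  rw [hcount]
  constructor
  · intro h
    have : 0 < (l.take i).count v ∨ 0 < (l.drop (i + 1)).count v := by omega
    rcases this with h1 | h2
    · rw [List.count_pos_iff, List.mem_take_iff_getElem] at h1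
      obtain ⟨j, hj, hje⟩ := h1
      exact ⟨j, by omega, by omega, hje⟩
    · rw [List.count_pos_iff, List.mem_drop_iff_getElem] at h2
      obtain ⟨j, hj, hje⟩ := h2
      exact ⟨i + 1 + j, by omega, by omega, hje⟩
  · rintro ⟨j, hj, hji, hje⟩
    rcases Nat.lt_or_ge j i with hlt | hge
    · have hm : v ∈ l.take i :=
        List.mem_take_iff_getElem.mpr ⟨j, by omega, hje⟩
      have := List.count_pos_iff.mpr hm
      omega
    · have hm : v ∈ l.drop (i + 1) :=
        List.mem_drop_iff_getElem.mpr ⟨j - (i + 1), by omega, by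
          have hidx : i + 1 + (j - (i + 1)) = j := by omega
          simp only [hidx]; exact hje⟩
      have := List.count_pos_iff.mpr hm
      omega

-- existence of an attacking partner, split by attack kind
theorem attack_split (s : List Int) (k : Nat) (hk : k < s.length) :
    ((∃ j, ∃ _ : j < s.length, j ≠ k ∧ s[j] = s[k])
      ∨ (∃ j, ∃ _ : j < s.length, j ≠ k ∧ s[j] - (j : Int) = s[k] - (k : Int))
      ∨ (∃ j, ∃ _ : j < s.length, j ≠ k ∧ s[j] + (j : Int) = s[k] + (k : Int)))
    ↔ ∃ j, ∃ _ : j < s.length, j ≠ k ∧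
        (s[j] = s[k] ∨ |s[k] - s[j]| = |(j : Int) - (k : Int)|) := by
  constructor
  · rintro (⟨j, hj, hjk, h⟩ | ⟨j, hj, hjk, h⟩ | ⟨j, hj, hjk, h⟩)
    · exact ⟨j, hj, hjk, Or.inl h⟩
    · exact ⟨j, hj, hjk, Or.inr (abs_eq_abs.mpr (Or.inr (by omega)))⟩
    · exact ⟨j, hj, hjk, Or.inr (abs_eq_abs.mpr (Or.inl (by omega)))⟩
  · rintro ⟨j, hj, hjk, h | h⟩
    · exact Or.inl ⟨j, hj, hjk, h⟩
    · rcases abs_eq_abs.mp h with h' | h'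
      · exact Or.inr (Or.inr ⟨j, hj, hjk, by omega⟩)
      · exact Or.inr (Or.inl ⟨j, hj, hjk, by omega⟩)

theorem main_lemma (s : List Int) : f (some s) = f_alt (some s) := by
  have hlen : PySem.List.len s = (s.length : Int) := by simp [PySem.List.len]
  -- normalize the A side to a sum over List.range
  have hA : f (some s)
      = ((List.range s.length).map (fun (k : Nat) =>
          if (PySem.List.pyRange 0 (s.length : Int) 1).any (condA s (k : Int))
          then (1 : Int) else 0)).sum := by
    show (PySem.List.pyRange 0 (PySem.List.len s) 1).foldl
      (fun count i => fInner s i count (PySem.List.pyRange 0 (PySem.List.len s) 1)) 0 = _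
    rw [hlen]
    have hcongr : ∀ (acc : Int), ∀ i ∈ PySem.List.pyRange 0 (s.length : Int) 1,
        fInner s i acc (PySem.List.pyRange 0 (s.length : Int) 1)
        = acc + (if (PySem.List.pyRange 0 (s.length : Int) 1).any (condA s i)
                 then 1 else 0) := fun acc i _ => fInner_eq s i acc _
    rw [PySem.List.foldl_congr_mem _ _ _ _ hcongr, PySem.List.foldl_add]
    rw [PySem.List.pyRange_zero_nat, List.map_map]
    simp only [zero_add, Function.comp_def]
  -- normalize the B side
  have hrows : ∀ v : Int,
      ((PySem.List.enumerate s).foldl (fun d p => d.insert p.2 (d.getD p.2 0 + 1))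
        PySem.Dict.empty).getD v 0 = (s.count v : Int) := by
    intro v
    rw [← List.foldl_map (f := fun p : Int × Int => p.2)
          (g := fun d x => PySem.Dict.insert d x (d.getD x 0 + 1))]
    rw [PySem.Dict.getD_foldl_insert_add_one, PySem.List.map_snd_enumerate]
    simp
  have hd1 : ∀ v : Int,
      ((PySem.List.enumerate s).foldl (fun d p => d.insert (p.2 - p.1) (d.getD (p.2 - p.1) 0 + 1))
        PySem.Dict.empty).getD v 0
      = (((PySem.List.enumerate s).map (fun p => p.2 - p.1)).count v : Int) := by
    intro v
    rw [← List.foldl_map (f := fun p : Int × Int => p.2 - p.1)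
          (g := fun d x => PySem.Dict.insert d x (d.getD x 0 + 1))]
    rw [PySem.Dict.getD_foldl_insert_add_one]
    simp
  have hd2 : ∀ v : Int,
      ((PySem.List.enumerate s).foldl (fun d p => d.insert (p.2 + p.1) (d.getD (p.2 + p.1) 0 + 1))
        PySem.Dict.empty).getD v 0
      = (((PySem.List.enumerate s).map (fun p => p.2 + p.1)).count v : Int) := by
    intro v
    rw [← List.foldl_map (f := fun p : Int × Int => p.2 + p.1)
          (g := fun d x => PySem.Dict.insert d x (d.getD x 0 + 1))]
    rw [PySem.Dict.getD_foldl_insert_add_one]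
    simp
  have hB : f_alt (some s)
      = ((List.range s.length).map (fun (k : Nat) =>
          if (s.count (PySem.List.pyGetD s (k : Int) 0) : Int) > 1
            ∨ (((PySem.List.enumerate s).map (fun p => p.2 - p.1)).count
                (PySem.List.pyGetD s (k : Int) 0 - (k : Int)) : Int) > 1
            ∨ (((PySem.List.enumerate s).map (fun p => p.2 + p.1)).count
                (PySem.List.pyGetD s (k : Int) 0 + (k : Int)) : Int) > 1
          then (1 : Int) else 0)).sum := by
    show (PySem.List.enumerate s).foldl _ 0 = _
    rw [tripleFold]
    dsimp only
    have hbody : ∀ (acc : Int), ∀ p ∈ PySem.List.enumerate s,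
        (if ((PySem.List.enumerate s).foldl (fun d p => d.insert p.2 (d.getD p.2 0 + 1))
              (PySem.Dict.empty : PySem.Dict Int Int)).getD p.2 0 > 1
          ∨ ((PySem.List.enumerate s).foldl
              (fun d p => d.insert (p.2 - p.1) (d.getD (p.2 - p.1) 0 + 1))
              (PySem.Dict.empty : PySem.Dict Int Int)).getD (p.2 - p.1) 0 > 1
          ∨ ((PySem.List.enumerate s).foldl
              (fun d p => d.insert (p.2 + p.1) (d.getD (p.2 + p.1) 0 + 1))
              (PySem.Dict.empty : PySem.Dict Int Int)).getD (p.2 + p.1) 0 > 1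
         then acc + 1 else acc)
        = acc + (if (s.count p.2 : Int) > 1
            ∨ (((PySem.List.enumerate s).map (fun p => p.2 - p.1)).count (p.2 - p.1) : Int) > 1
            ∨ (((PySem.List.enumerate s).map (fun p => p.2 + p.1)).count (p.2 + p.1) : Int) > 1
          then 1 else 0) := by
      intro acc p _
      rw [hrows p.2, hd1 (p.2 - p.1), hd2 (p.2 + p.1)]
      split_ifs with h
      · rfl
      · omega
    rw [PySem.List.foldl_congr_mem _ _ _ _ hbody, PySem.List.foldl_add]
    rw [PySem.List.enumerate_eq_map_pyRange s 0, hlen, PySem.List.pyRange_zero_nat,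
        List.map_map, List.map_map]
    simp only [zero_add, Function.comp_def]
  rw [hA, hB]
  congr 1
  refine List.map_congr_left (fun k hk => ?_)
  have hk' : k < s.length := List.mem_range.mp hk
  have hgetD : ∀ (m : Nat) (hm : m < s.length), PySem.List.pyGetD s (m : Int) 0 = s[m] := by
    intro m hm
    rw [PySem.List.pyGetD_natCast, List.getD_eq_getElem s 0 hm]
  -- the two tests agree at index k
  have hAiff : (PySem.List.pyRange 0 (s.length : Int) 1).any (condA s (k : Int)) = true
      ↔ ∃ j, ∃ _ : j < s.length, j ≠ k ∧
          (s[j] = s[k] ∨ |s[k] - s[j]| = |(j : Int) - (k : Int)|) := by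
    rw [List.any_eq_true]
    constructor
    · rintro ⟨x, hx, hc⟩
      rw [PySem.List.mem_pyRange_one] at hx
      obtain ⟨hx0, hxn⟩ := hx
      simp only [condA, Bool.and_eq_true, Bool.not_eq_true', beq_eq_false_iff_ne,
        ne_eq, Bool.or_eq_true, beq_iff_eq] at hc
      have hxc : ((x.toNat : Nat) : Int) = x := by omega
      have hxlt : x.toNat < s.length := by omega
      refine ⟨x.toNat, hxlt, by omega, ?_⟩
      have h1 : PySem.List.pyGetD s x 0 = s[x.toNat] := by
        have h := hgetD x.toNat hxlt
        rw [hxc] at h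
        exact h
      have h2 : PySem.List.pyGetD s (k : Int) 0 = s[k] := hgetD k hk'
      rcases hc.2 with h | h
      · left; rw [← h1, ← h2, h]
      · right; rw [← h1, ← h2, hxc]; exact h
    · rintro ⟨j, hj, hjk, hc⟩
      refine ⟨(j : Int), PySem.List.mem_pyRange_one.mpr ⟨by omega, by omega⟩, ?_⟩
      have h1 : PySem.List.pyGetD s (j : Int) 0 = s[j] := hgetD j hj
      have h2 : PySem.List.pyGetD s (k : Int) 0 = s[k] := hgetD k hk'
      simp only [condA, Bool.and_eq_true, Bool.not_eq_true', beq_eq_false_iff_ne,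
        ne_eq, Bool.or_eq_true, beq_iff_eq, h1, h2]
      refine ⟨by omega, ?_⟩
      rcases hc with h | h
      · left; omega
      · right; exact h
  -- reduce B's counts to existentials via count_one_lt
  have hde : ((PySem.List.enumerate s).map (fun p => p.2 - p.1)).length = s.length := by
    simp [PySem.List.length_enumerate]
  have hse : ((PySem.List.enumerate s).map (fun p => p.2 + p.1)).length = s.length := by
    simp [PySem.List.length_enumerate]
  have hdg : ∀ (m : Nat) (hm : m < s.length),
      ((PySem.List.enumerate s).map (fun p => p.2 - p.1))[m]'(by omega)
        = s[m] - (m : Int) := by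
    intro m hm
    rw [List.getElem_map, PySem.List.getElem_enumerate]
    simp
  have hsg : ∀ (m : Nat) (hm : m < s.length),
      ((PySem.List.enumerate s).map (fun p => p.2 + p.1))[m]'(by omega)
        = s[m] + (m : Int) := by
    intro m hm
    rw [List.getElem_map, PySem.List.getElem_enumerate]
    simp
  have hc1 : ((s.count (PySem.List.pyGetD s (k : Int) 0) : Int) > 1)
      ↔ ∃ j, ∃ _ : j < s.length, j ≠ k ∧ s[j] = s[k] := by
    rw [hgetD k hk']
    have h := count_one_lt hk' (v := s[k]) rfl
    constructor
    · intro hgt; exact h.mp (by omega)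
    · intro he; have := h.mpr he; omega
  have hc2 : ((((PySem.List.enumerate s).map (fun p => p.2 - p.1)).count
        (PySem.List.pyGetD s (k : Int) 0 - (k : Int)) : Int) > 1)
      ↔ ∃ j, ∃ _ : j < s.length, j ≠ k ∧ s[j] - (j : Int) = s[k] - (k : Int) := by
    rw [hgetD k hk']
    have h := count_one_lt (l := (PySem.List.enumerate s).map (fun p => p.2 - p.1))
      (i := k) (by omega) (v := s[k] - (k : Int)) (hdg k hk')
    constructor
    · intro hgt
      obtain ⟨j, hj, hjk, hje⟩ := h.mp (by omega)
      refine ⟨j, by omega, hjk, ?_⟩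
      rw [hdg j (by omega)] at hje
      exact hje
    · rintro ⟨j, hj, hjk, hje⟩
      have : 1 < ((PySem.List.enumerate s).map (fun p => p.2 - p.1)).count
          (s[k] - (k : Int)) := h.mpr ⟨j, by omega, hjk, by rw [hdg j (by omega)]; exact hje⟩
      omega
  have hc3 : ((((PySem.List.enumerate s).map (fun p => p.2 + p.1)).count
        (PySem.List.pyGetD s (k : Int) 0 + (k : Int)) : Int) > 1)
      ↔ ∃ j, ∃ _ : j < s.length, j ≠ k ∧ s[j] + (j : Int) = s[k] + (k : Int) := by
    rw [hgetD k hk']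
    have h := count_one_lt (l := (PySem.List.enumerate s).map (fun p => p.2 + p.1))
      (i := k) (by omega) (v := s[k] + (k : Int)) (hsg k hk')
    constructor
    · intro hgt
      obtain ⟨j, hj, hjk, hje⟩ := h.mp (by omega)
      refine ⟨j, by omega, hjk, ?_⟩
      rw [hsg j (by omega)] at hje
      exact hje
    · rintro ⟨j, hj, hjk, hje⟩
      have : 1 < ((PySem.List.enumerate s).map (fun p => p.2 + p.1)).count
          (s[k] + (k : Int)) := h.mpr ⟨j, by omega, hjk, by rw [hsg j (by omega)]; exact hje⟩
      omega
  have hiff : ((PySem.List.pyRange 0 (s.length : Int) 1).any (condA s (k : Int)) = true)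
      ↔ ((s.count (PySem.List.pyGetD s (k : Int) 0) : Int) > 1
        ∨ (((PySem.List.enumerate s).map (fun p => p.2 - p.1)).count
            (PySem.List.pyGetD s (k : Int) 0 - (k : Int)) : Int) > 1
        ∨ (((PySem.List.enumerate s).map (fun p => p.2 + p.1)).count
            (PySem.List.pyGetD s (k : Int) 0 + (k : Int)) : Int) > 1) := by
    rw [hAiff, hc1, hc2, hc3]
    exact (attack_split s k hk').symm
  exact if_congr hiff rfl rfl

-- ===== VERDICT (by name: the statement is the Claim_ definition above) =====
theorem f_spec : Claim_equal_f := by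
  intro state _
  unfold Spec_f
  cases state with
  | none => rfl
  | some s => exact main_lemma s
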